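-- pv_equiv track=rewrite | github.com/parasiitism/AlgoDaily | leetcode/1826-faulty-sensor/main.py | badSensor
-- ===== SOURCE A (Python) =====
-- from typing import List
--
-- def badSensor(sensor1: List[int], sensor2: List[int]) -> int:
--     n = len(sensor1)
--     for i in range(n-1):
--         if sensor1[i] == sensor2[i]:
--             continue
--         if tuple(sensor1[i:-1]) == tuple(sensor2[i+1:]):
--             return 1
--         if tuple(sensor1[i+1:]) == tuple(sensor2[i:-1]):
--             return 2
--     return -1
-- ===== SOURCE B (Python) =====
-- from typing import List
--
-- def badSensor(sensor1: List[int], sensor2: List[int]) -> int: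
--     n = len(sensor1)
--     if len(sensor2) != n:
--         return -1
--     # c1 = smallest i such that sensor1[i:n-1] == sensor2[i+1:n]
--     c1 = n - 1
--     while c1 > 0 and sensor1[c1 - 1] == sensor2[c1]:
--         c1 -= 1
--     # c2 = smallest i such that sensor1[i+1:n] == sensor2[i:n-1]
--     c2 = n - 1
--     while c2 > 0 and sensor1[c2] == sensor2[c2 - 1]:
--         c2 -= 1
--     i = min(c1, c2)
--     while i < n - 1:
--         if sensor1[i] != sensor2[i]:
--             return 1 if i >= c1 else 2
--         i += 1
--     return -1
-- ===== Notes on version B (the rewrite author's own statement) =====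
-- stated objective: faster
-- what changed: A re-runs an O(n) suffix-slice comparison at every mismatching index; B does two O(n) backward scans to find the smallest index from which each shifted-suffix check holds, then a single forward scan for the first mismatch at or beyond them.
import Mathlib
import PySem

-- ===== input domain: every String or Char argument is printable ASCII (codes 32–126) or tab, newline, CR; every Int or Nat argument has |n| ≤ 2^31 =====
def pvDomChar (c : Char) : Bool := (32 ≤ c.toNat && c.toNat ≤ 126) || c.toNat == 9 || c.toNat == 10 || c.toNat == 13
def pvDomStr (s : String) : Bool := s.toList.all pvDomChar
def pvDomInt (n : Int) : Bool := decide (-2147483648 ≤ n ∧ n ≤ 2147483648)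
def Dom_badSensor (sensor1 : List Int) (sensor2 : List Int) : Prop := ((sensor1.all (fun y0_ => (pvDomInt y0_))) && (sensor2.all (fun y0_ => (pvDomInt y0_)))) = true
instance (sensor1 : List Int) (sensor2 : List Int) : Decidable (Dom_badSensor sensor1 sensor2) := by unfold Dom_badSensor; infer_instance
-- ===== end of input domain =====

-- B replaces A's per-mismatch O(n) suffix-slice comparisons by two O(n) backward scans that
-- locate the smallest index from which each shifted-suffix check holds, then one forward scan.

-- ===== PORT A =====
-- the 'for i in range(n-1)' loop; fuel = number of remaining indices, i the current index
def badSensorLoopA (s1 s2 : List Int) (i : Nat) : Nat → Int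
  | 0 => -1
  | fuel + 1 =>
    if PySem.List.pyGetD s1 (i : Int) 0 = PySem.List.pyGetD s2 (i : Int) 0 then
      badSensorLoopA s1 s2 (i + 1) fuel
    else if PySem.List.slice s1 (some (i : Int)) (some (-1)) =
            PySem.List.slice s2 (some ((i : Int) + 1)) none then 1
    else if PySem.List.slice s1 (some ((i : Int) + 1)) none =
            PySem.List.slice s2 (some (i : Int)) (some (-1)) then 2
    else badSensorLoopA s1 s2 (i + 1) fuel

def badSensor (sensor1 : List Int) (sensor2 : List Int) : Int :=
  badSensorLoopA sensor1 sensor2 0 (sensor1.length - 1)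

-- ===== PORT B =====
-- 'c1 = n-1; while c1 > 0 and sensor1[c1-1] == sensor2[c1]: c1 -= 1'
def badSensorC1 (s1 s2 : List Int) : Nat → Nat
  | 0 => 0
  | c + 1 =>
    if PySem.List.pyGetD s1 (c : Int) 0 = PySem.List.pyGetD s2 ((c : Int) + 1) 0 then
      badSensorC1 s1 s2 c
    else c + 1

-- 'c2 = n-1; while c2 > 0 and sensor1[c2] == sensor2[c2-1]: c2 -= 1'
def badSensorC2 (s1 s2 : List Int) : Nat → Nat
  | 0 => 0
  | c + 1 =>
    if PySem.List.pyGetD s1 ((c : Int) + 1) 0 = PySem.List.pyGetD s2 (c : Int) 0 then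
      badSensorC2 s1 s2 c
    else c + 1

-- 'while i < n-1: …'; fuel = n-1-i
def badSensorLoopB (s1 s2 : List Int) (c1 : Nat) (i : Nat) : Nat → Int
  | 0 => -1
  | fuel + 1 =>
    if PySem.List.pyGetD s1 (i : Int) 0 ≠ PySem.List.pyGetD s2 (i : Int) 0 then
      (if c1 ≤ i then 1 else 2)
    else badSensorLoopB s1 s2 c1 (i + 1) fuel

def badSensor_alt (sensor1 : List Int) (sensor2 : List Int) : Int :=
  let n := sensor1.length
  if sensor2.length ≠ n then -1
  else
    let c1 := badSensorC1 sensor1 sensor2 (n - 1)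
    let c2 := badSensorC2 sensor1 sensor2 (n - 1)
    let i := min c1 c2
    badSensorLoopB sensor1 sensor2 c1 i (n - 1 - i)

-- ===== PRECONDITION & SPEC =====
-- A raises IndexError (sensor2[i] with i beyond sensor2) exactly when len(sensor2) < len(sensor1) - 1;
-- Pre_ is precisely A's return domain, it excludes no input on which A returns.
def Pre_badSensor (sensor1 : List Int) (sensor2 : List Int) : Prop :=
  sensor1.length ≤ sensor2.length + 1
instance (sensor1 : List Int) (sensor2 : List Int) : Decidable (Pre_badSensor sensor1 sensor2) := by
  unfold Pre_badSensor; infer_instance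

def pvWitness_badSensor : List Int × List Int := ([2, 3, 4, 5], [2, 1, 3, 4])

def Spec_badSensor (sensor1 : List Int) (sensor2 : List Int) (out : Int) : Prop := out = badSensor_alt sensor1 sensor2
instance (sensor1 : List Int) (sensor2 : List Int) (out : Int) : Decidable (Spec_badSensor sensor1 sensor2 out) := by unfold Spec_badSensor; infer_instance

-- ===== CLAIM (what is proved, stated in full; the proofs are below) =====
def Claim_equal_badSensor : Prop := ∀ (sensor1 : List Int) (sensor2 : List Int), Dom_badSensor sensor1 sensor2 → Pre_badSensor sensor1 sensor2 → Spec_badSensor sensor1 sensor2 (badSensor sensor1 sensor2)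


-- ===== LEMMAS AND PROOFS =====

-- A's slice s1[i:-1] in list terms
theorem pvSlice_nat_negOne (xs : List Int) (i : Nat) :
    PySem.List.slice xs (some (i : Int)) (some (-1)) = xs.dropLast.drop i := by
  have h0 : ¬ ((i : Int) < 0) := by omega
  simp [PySem.List.slice, PySem.List.clampIdx, List.dropLast_eq_take, h0]
  rcases eq_or_ne xs [] with h | h
  · subst h; simp
  · simp only [h, if_false]
    rw [List.drop_take]
    by_cases hle : i ≤ xs.length
    · rw [min_eq_left hle]; congr 1; omega
    · rw [min_eq_right (by omega)]
      rw [List.drop_length, List.drop_eq_nil_of_le (by omega), List.take_nil, List.take_nil]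

-- A's slice s[i+1:] in list terms
theorem pvSlice_from_succ (xs : List Int) (i : Nat) :
    PySem.List.slice xs (some ((i : Int) + 1)) none = xs.drop (i + 1) := by
  have : ((i : Int) + 1) = ((i + 1 : Nat) : Int) := by push_cast; ring
  rw [this, PySem.List.slice_from_natCast]

-- pyGetD at a Nat index in range is getElem!
theorem pvGetD_bang (xs : List Int) (j : Nat) (_h : j < xs.length) :
    PySem.List.pyGetD xs (j : Int) 0 = xs[j]! := by
  simp [PySem.List.pyGetD_natCast, List.getD_eq_getElem?_getD, List.getElem!_eq_getElem?_getD]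

-- elementwise characterization of A's first slice check
theorem pvP1_char (s1 s2 : List Int) (i : Nat) (hm : s2.length = s1.length) :
    (s1.dropLast.drop i = s2.drop (i + 1)) ↔
      (∀ j, i ≤ j → j + 1 < s1.length → s1[j]! = s2[j + 1]!) := by
  constructor
  · intro hEq j hij hj
    have h2 := congrArg (fun l => l[j - i]?) hEq
    simp only [List.getElem?_drop, List.dropLast_eq_take, List.getElem?_take] at h2
    rw [show i + (j - i) = j from by omega, if_pos (by omega),
        show i + 1 + (j - i) = j + 1 from by omega] at h2
    rw [List.getElem?_eq_getElem (by omega), List.getElem?_eq_getElem (by omega)] at h2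
    rw [getElem!_pos s1 j (by omega), getElem!_pos s2 (j + 1) (by omega)]
    exact Option.some.inj h2
  · intro hAll
    apply List.ext_getElem?
    intro t
    simp only [List.getElem?_drop, List.dropLast_eq_take, List.getElem?_take]
    rw [show i + 1 + t = i + t + 1 from Nat.add_right_comm i 1 t]
    by_cases ht : i + t < s1.length - 1
    · rw [if_pos ht]
      have h3 := hAll (i + t) (by omega) (by omega)
      rw [getElem!_pos s1 (i + t) (by omega), getElem!_pos s2 (i + t + 1) (by omega)] at h3
      rw [List.getElem?_eq_getElem (by omega), List.getElem?_eq_getElem (by omega)]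
      exact congrArg some h3
    · rw [if_neg ht]
      symm
      rw [List.getElem?_eq_none_iff]
      omega

-- elementwise characterization of A's second slice check
theorem pvP2_char (s1 s2 : List Int) (i : Nat) (hm : s2.length = s1.length) :
    (s1.drop (i + 1) = s2.dropLast.drop i) ↔
      (∀ j, i ≤ j → j + 1 < s1.length → s1[j + 1]! = s2[j]!) := by
  constructor
  · intro hEq j hij hj
    have h2 := congrArg (fun l => l[j - i]?) hEq
    simp only [List.getElem?_drop, List.dropLast_eq_take, List.getElem?_take] at h2
    rw [show i + (j - i) = j from by omega, if_pos (by omega),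
        show i + 1 + (j - i) = j + 1 from by omega] at h2
    rw [List.getElem?_eq_getElem (by omega), List.getElem?_eq_getElem (by omega)] at h2
    rw [getElem!_pos s1 (j + 1) (by omega), getElem!_pos s2 j (by omega)]
    exact Option.some.inj h2
  · intro hAll
    apply List.ext_getElem?
    intro t
    simp only [List.getElem?_drop, List.dropLast_eq_take, List.getElem?_take]
    rw [show i + 1 + t = i + t + 1 from Nat.add_right_comm i 1 t]
    by_cases ht : i + t < s2.length - 1
    · rw [if_pos ht]
      have h3 := hAll (i + t) (by omega) (by omega)
      rw [getElem!_pos s1 (i + t + 1) (by omega), getElem!_pos s2 (i + t) (by omega)] at h3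
      rw [List.getElem?_eq_getElem (by omega), List.getElem?_eq_getElem (by omega)]
      exact congrArg some h3
    · rw [if_neg ht]
      rw [List.getElem?_eq_none_iff]
      omega

-- spec of B's first backward scan
theorem pvC1_spec (s1 s2 : List Int) (k : Nat) :
    badSensorC1 s1 s2 k ≤ k ∧
    (∀ j, badSensorC1 s1 s2 k ≤ j → j < k →
        PySem.List.pyGetD s1 (j : Int) 0 = PySem.List.pyGetD s2 ((j : Int) + 1) 0) ∧
    (badSensorC1 s1 s2 k = 0 ∨
        PySem.List.pyGetD s1 ((badSensorC1 s1 s2 k - 1 : Nat) : Int) 0 ≠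
        PySem.List.pyGetD s2 (((badSensorC1 s1 s2 k - 1 : Nat) : Int) + 1) 0) := by
  induction k with
  | zero => exact ⟨le_refl 0, fun j h1 h2 => absurd h2 (by omega), Or.inl rfl⟩
  | succ c ih =>
    by_cases h : PySem.List.pyGetD s1 (c : Int) 0 = PySem.List.pyGetD s2 ((c : Int) + 1) 0
    · rw [show badSensorC1 s1 s2 (c + 1) = badSensorC1 s1 s2 c from by
        simp only [badSensorC1, if_pos h]]
      obtain ⟨h1, h2, h3⟩ := ih
      refine ⟨by omega, ?_, h3⟩
      intro j hj hjc
      rcases Nat.lt_or_ge j c with hlt | hge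
      · exact h2 j hj hlt
      · have hjeq : j = c := by omega
        subst hjeq; exact h
    · rw [show badSensorC1 s1 s2 (c + 1) = c + 1 from by
        simp only [badSensorC1, if_neg h]]
      refine ⟨le_refl _, fun j h1 h2 => absurd h2 (by omega), Or.inr ?_⟩
      simpa using h

-- spec of B's second backward scan
theorem pvC2_spec (s1 s2 : List Int) (k : Nat) :
    badSensorC2 s1 s2 k ≤ k ∧
    (∀ j, badSensorC2 s1 s2 k ≤ j → j < k →
        PySem.List.pyGetD s1 ((j : Int) + 1) 0 = PySem.List.pyGetD s2 (j : Int) 0) ∧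
    (badSensorC2 s1 s2 k = 0 ∨
        PySem.List.pyGetD s1 (((badSensorC2 s1 s2 k - 1 : Nat) : Int) + 1) 0 ≠
        PySem.List.pyGetD s2 ((badSensorC2 s1 s2 k - 1 : Nat) : Int) 0) := by
  induction k with
  | zero => exact ⟨le_refl 0, fun j h1 h2 => absurd h2 (by omega), Or.inl rfl⟩
  | succ c ih =>
    by_cases h : PySem.List.pyGetD s1 ((c : Int) + 1) 0 = PySem.List.pyGetD s2 (c : Int) 0
    · rw [show badSensorC2 s1 s2 (c + 1) = badSensorC2 s1 s2 c from by
        simp only [badSensorC2, if_pos h]]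
      obtain ⟨h1, h2, h3⟩ := ih
      refine ⟨by omega, ?_, h3⟩
      intro j hj hjc
      rcases Nat.lt_or_ge j c with hlt | hge
      · exact h2 j hj hlt
      · have hjeq : j = c := by omega
        subst hjeq; exact h
    · rw [show badSensorC2 s1 s2 (c + 1) = c + 1 from by
        simp only [badSensorC2, if_neg h]]
      refine ⟨le_refl _, fun j h1 h2 => absurd h2 (by omega), Or.inr ?_⟩
      simpa using h

-- A's first slice check holds exactly from c1 on
theorem pvP1_iff (s1 s2 : List Int) (hm : s2.length = s1.length) (i : Nat) :
    (s1.dropLast.drop i = s2.drop (i + 1)) ↔ badSensorC1 s1 s2 (s1.length - 1) ≤ i := by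
  obtain ⟨h1, h2, h3⟩ := pvC1_spec s1 s2 (s1.length - 1)
  rw [pvP1_char s1 s2 i hm]
  constructor
  · intro hAll
    by_contra hlt
    rw [Nat.not_le] at hlt
    rcases h3 with h0 | hne
    · omega
    · apply hne
      have hAc := hAll (badSensorC1 s1 s2 (s1.length - 1) - 1) (by omega) (by omega)
      rw [pvGetD_bang s1 _ (by omega),
          show (((badSensorC1 s1 s2 (s1.length - 1) - 1 : Nat) : Int) + 1)
             = (((badSensorC1 s1 s2 (s1.length - 1) - 1) + 1 : Nat) : Int) from by push_cast; ring,
          pvGetD_bang s2 _ (by omega)]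
      exact hAc
  · intro hci j hij hj
    have hj2 := h2 j (by omega) (by omega)
    rw [pvGetD_bang s1 j (by omega),
        show ((j : Int) + 1) = ((j + 1 : Nat) : Int) from by push_cast; ring,
        pvGetD_bang s2 (j + 1) (by omega)] at hj2
    exact hj2

-- A's second slice check holds exactly from c2 on
theorem pvP2_iff (s1 s2 : List Int) (hm : s2.length = s1.length) (i : Nat) :
    (s1.drop (i + 1) = s2.dropLast.drop i) ↔ badSensorC2 s1 s2 (s1.length - 1) ≤ i := by
  obtain ⟨h1, h2, h3⟩ := pvC2_spec s1 s2 (s1.length - 1)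
  rw [pvP2_char s1 s2 i hm]
  constructor
  · intro hAll
    by_contra hlt
    rw [Nat.not_le] at hlt
    rcases h3 with h0 | hne
    · omega
    · apply hne
      have hAc := hAll (badSensorC2 s1 s2 (s1.length - 1) - 1) (by omega) (by omega)
      rw [show (((badSensorC2 s1 s2 (s1.length - 1) - 1 : Nat) : Int) + 1)
             = (((badSensorC2 s1 s2 (s1.length - 1) - 1) + 1 : Nat) : Int) from by push_cast; ring,
          pvGetD_bang s1 _ (by omega), pvGetD_bang s2 _ (by omega)]
      exact hAc
  · intro hci j hij hj
    have hj2 := h2 j (by omega) (by omega)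
    rw [show ((j : Int) + 1) = ((j + 1 : Nat) : Int) from by push_cast; ring,
        pvGetD_bang s1 (j + 1) (by omega), pvGetD_bang s2 j (by omega)] at hj2
    exact hj2

-- with unequal lengths all of A's slice checks fail and the loop falls through to -1
theorem pvLoopA_ne (s1 s2 : List Int) (hm : s2.length ≠ s1.length) :
    ∀ fuel i, i + fuel ≤ s1.length - 1 → badSensorLoopA s1 s2 i fuel = -1 := by
  intro fuel
  induction fuel with
  | zero => intro i h; rfl
  | succ f ih =>
    intro i h
    simp only [badSensorLoopA]
    have hch1 : ¬ (PySem.List.slice s1 (some (i : Int)) (some (-1)) =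
        PySem.List.slice s2 (some ((i : Int) + 1)) none) := by
      rw [pvSlice_nat_negOne, pvSlice_from_succ]
      intro hEq
      have hlen := congrArg List.length hEq
      simp only [List.length_drop, List.length_dropLast] at hlen
      omega
    have hch2 : ¬ (PySem.List.slice s1 (some ((i : Int) + 1)) none =
        PySem.List.slice s2 (some (i : Int)) (some (-1))) := by
      rw [pvSlice_nat_negOne, pvSlice_from_succ]
      intro hEq
      have hlen := congrArg List.length hEq
      simp only [List.length_drop, List.length_dropLast] at hlen
      omega
    by_cases hg : PySem.List.pyGetD s1 (i : Int) 0 = PySem.List.pyGetD s2 (i : Int) 0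
    · rw [if_pos hg]; exact ih (i + 1) (by omega)
    · rw [if_neg hg, if_neg hch1, if_neg hch2]; exact ih (i + 1) (by omega)

-- below min c1 c2, A's loop only skips forward
theorem pvLoopA_skip (s1 s2 : List Int) (hm : s2.length = s1.length)
    (hmin : min (badSensorC1 s1 s2 (s1.length - 1)) (badSensorC2 s1 s2 (s1.length - 1)) ≤ s1.length - 1) :
    ∀ d i, i + d = min (badSensorC1 s1 s2 (s1.length - 1)) (badSensorC2 s1 s2 (s1.length - 1)) →
      badSensorLoopA s1 s2 i (s1.length - 1 - i) =
      badSensorLoopA s1 s2 (min (badSensorC1 s1 s2 (s1.length - 1)) (badSensorC2 s1 s2 (s1.length - 1)))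
        (s1.length - 1 - min (badSensorC1 s1 s2 (s1.length - 1)) (badSensorC2 s1 s2 (s1.length - 1))) := by
  intro d
  induction d with
  | zero =>
    intro i hid
    rw [show i = min (badSensorC1 s1 s2 (s1.length - 1)) (badSensorC2 s1 s2 (s1.length - 1)) from by omega]
  | succ dd ih =>
    intro i hid
    have hin : i < s1.length - 1 := by omega
    rw [show s1.length - 1 - i = (s1.length - 1 - (i + 1)) + 1 from by omega]
    simp only [badSensorLoopA]
    have hch1 : ¬ (PySem.List.slice s1 (some (i : Int)) (some (-1)) =
        PySem.List.slice s2 (some ((i : Int) + 1)) none) := by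
      rw [pvSlice_nat_negOne, pvSlice_from_succ, pvP1_iff s1 s2 hm i]
      omega
    have hch2 : ¬ (PySem.List.slice s1 (some ((i : Int) + 1)) none =
        PySem.List.slice s2 (some (i : Int)) (some (-1))) := by
      rw [pvSlice_nat_negOne, pvSlice_from_succ, pvP2_iff s1 s2 hm i]
      omega
    by_cases hg : PySem.List.pyGetD s1 (i : Int) 0 = PySem.List.pyGetD s2 (i : Int) 0
    · rw [if_pos hg]; exact ih (i + 1) (by omega)
    · rw [if_neg hg, if_neg hch1, if_neg hch2]; exact ih (i + 1) (by omega)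

-- from min c1 c2 on, A's loop and B's loop agree
theorem pvLoopA_eq_loopB (s1 s2 : List Int) (hm : s2.length = s1.length) :
    ∀ fuel i, fuel = s1.length - 1 - i →
      min (badSensorC1 s1 s2 (s1.length - 1)) (badSensorC2 s1 s2 (s1.length - 1)) ≤ i →
      badSensorLoopA s1 s2 i fuel = badSensorLoopB s1 s2 (badSensorC1 s1 s2 (s1.length - 1)) i fuel := by
  intro fuel
  induction fuel with
  | zero => intro i _ _; rfl
  | succ f ih =>
    intro i hf hmi
    have hin : i < s1.length - 1 := by omega
    simp only [badSensorLoopA, badSensorLoopB]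
    by_cases hg : PySem.List.pyGetD s1 (i : Int) 0 = PySem.List.pyGetD s2 (i : Int) 0
    · rw [if_pos hg, if_neg (not_not_intro hg)]
      exact ih (i + 1) (by omega) (by omega)
    · rw [if_neg hg, if_pos hg]
      by_cases hc1 : badSensorC1 s1 s2 (s1.length - 1) ≤ i
      · have hch1 : PySem.List.slice s1 (some (i : Int)) (some (-1)) =
            PySem.List.slice s2 (some ((i : Int) + 1)) none := by
          rw [pvSlice_nat_negOne, pvSlice_from_succ]
          exact (pvP1_iff s1 s2 hm i).2 hc1
        rw [if_pos hch1, if_pos hc1]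
      · have hc2 : badSensorC2 s1 s2 (s1.length - 1) ≤ i := by omega
        have hch1 : ¬ (PySem.List.slice s1 (some (i : Int)) (some (-1)) =
            PySem.List.slice s2 (some ((i : Int) + 1)) none) := by
          rw [pvSlice_nat_negOne, pvSlice_from_succ, pvP1_iff s1 s2 hm i]
          omega
        have hch2 : PySem.List.slice s1 (some ((i : Int) + 1)) none =
            PySem.List.slice s2 (some (i : Int)) (some (-1)) := by
          rw [pvSlice_nat_negOne, pvSlice_from_succ, pvP2_iff s1 s2 hm i]
          omega
        rw [if_neg hch1, if_pos hch2, if_neg hc1]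

-- ===== VERDICT (by name: the statement is the Claim_ definition above) =====
theorem badSensor_spec : Claim_equal_badSensor := by
  intro s1 s2 _hdom _hpre
  unfold Spec_badSensor badSensor
  have halt : badSensor_alt s1 s2 =
      if s2.length ≠ s1.length then (-1 : Int)
      else badSensorLoopB s1 s2 (badSensorC1 s1 s2 (s1.length - 1))
        (min (badSensorC1 s1 s2 (s1.length - 1)) (badSensorC2 s1 s2 (s1.length - 1)))
        (s1.length - 1 - min (badSensorC1 s1 s2 (s1.length - 1)) (badSensorC2 s1 s2 (s1.length - 1))) := rfl
  by_cases hm : s2.length = s1.length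
  · rw [halt, if_neg (fun hc => hc hm)]
    have hc1 := (pvC1_spec s1 s2 (s1.length - 1)).1
    have hmin : min (badSensorC1 s1 s2 (s1.length - 1)) (badSensorC2 s1 s2 (s1.length - 1)) ≤ s1.length - 1 := by omega
    have hskip := pvLoopA_skip s1 s2 hm hmin
      (min (badSensorC1 s1 s2 (s1.length - 1)) (badSensorC2 s1 s2 (s1.length - 1))) 0 (by omega)
    have hmain := pvLoopA_eq_loopB s1 s2 hm
      (s1.length - 1 - min (badSensorC1 s1 s2 (s1.length - 1)) (badSensorC2 s1 s2 (s1.length - 1)))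
      (min (badSensorC1 s1 s2 (s1.length - 1)) (badSensorC2 s1 s2 (s1.length - 1))) rfl (le_refl _)
    calc badSensorLoopA s1 s2 0 (s1.length - 1) =
        badSensorLoopA s1 s2 (min (badSensorC1 s1 s2 (s1.length - 1)) (badSensorC2 s1 s2 (s1.length - 1)))
          (s1.length - 1 - min (badSensorC1 s1 s2 (s1.length - 1)) (badSensorC2 s1 s2 (s1.length - 1))) := hskip
      _ = _ := hmain
  · rw [halt, if_pos hm]
    exact pvLoopA_ne s1 s2 hm (s1.length - 1) 0 (by omega)
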